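-- pv_equiv track=rewrite | github.com/sweetysweets/Algorithm-Python | myclass/homework1/problem1.py | get_num_2
-- ===== SOURCE A (Python) =====
-- def get_num_2(nums,k):
--     res = 0
--     if not nums:
--         return res
--     size = len(nums)
--     max = 0
--     min = 0
--     for i in range(0, size):
--         max = nums[i]
--         min = nums[i]
--         for j in range(i+1, size):
--             if nums[j] < min:
--                 min = nums[j]
--             if nums[j] > max:
--                 max = nums[j]
--             if max - min > k:
--                 res += (size - j)
--                 break
--     return res
-- ===== SOURCE B (Python) =====
-- def get_num_2(nums, k):
--     n = len(nums)
--     good = 0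
--     l = 0
--     for r in range(n):
--         while l < r and max(nums[l:r+1]) - min(nums[l:r+1]) > k:
--             l += 1
--         good += r - l
--     return n * (n - 1) // 2 - good
-- ===== Notes on version B (the rewrite author's own statement) =====
-- stated objective: alternative
-- what changed: A scans forward from every start index with running max/min and a break; B counts the complement with a two-pointer sliding window (monotonically advancing left pointer, window range recomputed from the slice) and subtracts the within-threshold pair count from n*(n-1)/2.
import Mathlib
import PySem

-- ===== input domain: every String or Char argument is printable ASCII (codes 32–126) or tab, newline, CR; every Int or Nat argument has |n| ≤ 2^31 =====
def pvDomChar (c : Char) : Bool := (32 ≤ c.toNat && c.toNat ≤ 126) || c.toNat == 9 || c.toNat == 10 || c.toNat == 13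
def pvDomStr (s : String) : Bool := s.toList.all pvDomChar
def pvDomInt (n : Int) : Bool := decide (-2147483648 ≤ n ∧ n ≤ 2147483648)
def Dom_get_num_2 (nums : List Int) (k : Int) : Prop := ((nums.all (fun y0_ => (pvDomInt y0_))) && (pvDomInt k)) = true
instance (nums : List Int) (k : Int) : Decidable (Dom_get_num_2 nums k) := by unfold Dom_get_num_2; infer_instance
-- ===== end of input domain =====

-- B replaces A's quadratic start-index scan with a complement count: a two-pointer
-- sliding window counts the pairs (i,j) whose subarray range is ≤ k and subtracts
-- them from the total number of pairs (objective: alternative algorithm).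

-- ===== PORT A =====
-- inner 'for j in range(i+1, size)' loop with its break, carrying the running max/min
def innerA (nums : List Int) (k : Int) (size : Int) : Int → Int → List Int → Int
  | _, _, [] => 0
  | mx, mn, j :: rest =>
    let x := (PySem.List.pyGet? nums j).getD 0
    let mn' := if x < mn then x else mn
    let mx' := if x > mx then x else mx
    if mx' - mn' > k then size - j else innerA nums k size mx' mn' rest

def get_num_2 (nums : List Int) (k : Int) : Int :=
  if nums = [] then 0
  else
    let size : Int := (nums.length : Int)
    (PySem.List.pyRange 0 size 1).foldl
      (fun res i =>
        let mx := (PySem.List.pyGet? nums i).getD 0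
        let mn := (PySem.List.pyGet? nums i).getD 0
        res + innerA nums k size mx mn (PySem.List.pyRange (i + 1) size 1)) 0

-- ===== PORT B =====
-- max(nums[l:r+1]) and min(nums[l:r+1])
def winMax (nums : List Int) (l r : Int) : Int :=
  (PySem.List.max? (PySem.List.slice nums (some l) (some (r + 1))) (fun y => y)).getD 0
def winMin (nums : List Int) (l r : Int) : Int :=
  (PySem.List.min? (PySem.List.slice nums (some l) (some (r + 1))) (fun y => y)).getD 0

-- the 'while l < r and max(...) - min(...) > k: l += 1' loop
def advB (nums : List Int) (k : Int) (r : Int) (l : Int) : Int :=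
  if h : l < r ∧ winMax nums l r - winMin nums l r > k then advB nums k r (l + 1) else l
termination_by (r - l).toNat
decreasing_by omega

def get_num_2_alt (nums : List Int) (k : Int) : Int :=
  let n : Int := (nums.length : Int)
  let st := (PySem.List.pyRange 0 n 1).foldl
    (fun (st : Int × Int) r =>
      let l := advB nums k r st.1
      (l, st.2 + (r - l))) (0, 0)
  PySem.Int.floordiv (n * (n - 1)) 2 - st.2

-- ===== PRECONDITION & SPEC =====
def Spec_get_num_2 (nums : List Int) (k : Int) (out : Int) : Prop := out = get_num_2_alt nums k
instance (nums : List Int) (k : Int) (out : Int) : Decidable (Spec_get_num_2 nums k out) := by unfold Spec_get_num_2; infer_instance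

-- ===== CLAIM (what is proved, stated in full; the proofs are below) =====
def Claim_equal_get_num_2 : Prop := ∀ (nums : List Int) (k : Int), Dom_get_num_2 nums k → Spec_get_num_2 nums k (get_num_2 nums k)

-- ===== LEMMAS AND PROOFS =====

-- nums[i..j] as a list, and its max / min / "range exceeds k" predicate
def seg (nums : List Int) (i j : Nat) : List Int := (nums.drop i).take (j + 1 - i)
def segMax (nums : List Int) (i j : Nat) : Int :=
  match seg nums i j with | [] => 0 | a :: t => t.foldl max a
def segMin (nums : List Int) (i j : Nat) : Int :=
  match seg nums i j with | [] => 0 | a :: t => t.foldl min a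
def Pp (nums : List Int) (k : Int) (i j : Nat) : Bool := segMax nums i j - segMin nums i j > k

lemma seg_cons (nums : List Int) (i j : Nat) (hij : i ≤ j) (hi : i < nums.length) :
    seg nums i j = nums.getD i 0 :: seg nums (i + 1) j := by
  unfold seg
  rw [List.drop_eq_getElem_cons hi, show j + 1 - i = (j - i) + 1 by omega,
    show j + 1 - (i + 1) = j - i by omega, List.take_succ_cons]
  simp [List.getD_eq_getElem?_getD, List.getElem?_eq_getElem hi]

lemma seg_single (nums : List Int) (i : Nat) (hi : i < nums.length) :
    seg nums i i = [nums.getD i 0] := by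
  rw [seg_cons nums i i le_rfl hi]
  unfold seg
  simp

lemma seg_snoc (nums : List Int) (i j : Nat) (hij : i ≤ j) (hj : j + 1 < nums.length) :
    seg nums i (j + 1) = seg nums i j ++ [nums.getD (j + 1) 0] := by
  unfold seg
  rw [show j + 1 + 1 - i = (j + 1 - i) + 1 by omega, List.take_add_one]
  congr 1
  rw [List.getElem?_drop, show i + (j + 1 - i) = j + 1 by omega,
    List.getElem?_eq_getElem hj]
  simp [List.getD_eq_getElem?_getD, List.getElem?_eq_getElem hj]

lemma foldl_max_shift (t : List Int) (a b : Int) :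
    t.foldl max (max a b) = max a (t.foldl max b) := by
  induction t generalizing b with
  | nil => rfl
  | cons c t ih => simp only [List.foldl_cons, max_assoc, ih]

lemma foldl_min_shift (t : List Int) (a b : Int) :
    t.foldl min (min a b) = min a (t.foldl min b) := by
  induction t generalizing b with
  | nil => rfl
  | cons c t ih => simp only [List.foldl_cons, min_assoc, ih]

lemma segMax_single (nums : List Int) (i : Nat) (hi : i < nums.length) :
    segMax nums i i = nums.getD i 0 := by
  simp [segMax, seg_single nums i hi]

lemma segMin_single (nums : List Int) (i : Nat) (hi : i < nums.length) :
    segMin nums i i = nums.getD i 0 := by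
  simp [segMin, seg_single nums i hi]

lemma segMax_snoc (nums : List Int) (i j : Nat) (hij : i ≤ j) (hj : j + 1 < nums.length) :
    segMax nums i (j + 1) = max (segMax nums i j) (nums.getD (j + 1) 0) := by
  have hi : i < nums.length := by omega
  have hc := seg_cons nums i j hij hi
  unfold segMax
  rw [seg_snoc nums i j hij hj, hc]
  simp [List.foldl_append]

lemma segMin_snoc (nums : List Int) (i j : Nat) (hij : i ≤ j) (hj : j + 1 < nums.length) :
    segMin nums i (j + 1) = min (segMin nums i j) (nums.getD (j + 1) 0) := by
  have hi : i < nums.length := by omega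
  have hc := seg_cons nums i j hij hi
  unfold segMin
  rw [seg_snoc nums i j hij hj, hc]
  simp [List.foldl_append]

lemma segMax_cons (nums : List Int) (i j : Nat) (hij : i < j) (hj : j < nums.length) :
    segMax nums i j = max (nums.getD i 0) (segMax nums (i + 1) j) := by
  have hi : i < nums.length := by omega
  have hc2 := seg_cons nums (i + 1) j hij (by omega)
  unfold segMax
  rw [seg_cons nums i j (by omega) hi, hc2]
  simp [foldl_max_shift]

lemma segMin_cons (nums : List Int) (i j : Nat) (hij : i < j) (hj : j < nums.length) :
    segMin nums i j = min (nums.getD i 0) (segMin nums (i + 1) j) := by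
  have hi : i < nums.length := by omega
  have hc2 := seg_cons nums (i + 1) j hij (by omega)
  unfold segMin
  rw [seg_cons nums i j (by omega) hi, hc2]
  simp [foldl_min_shift]

-- widening the window to the right keeps the range over k
lemma Pp_mono_right (nums : List Int) (k : Int) (i j j' : Nat) (hij : i ≤ j) (hjj : j ≤ j')
    (hj' : j' < nums.length) (h : Pp nums k i j = true) : Pp nums k i j' = true := by
  induction j', hjj using Nat.le_induction with
  | base => exact h
  | succ j' hjj ih =>
    have hj'' : j' < nums.length := by omega
    have := ih hj''
    simp only [Pp, decide_eq_true_eq] at this ⊢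
    rw [segMax_snoc nums i j' (by omega) hj', segMin_snoc nums i j' (by omega) hj']
    have h1 := le_max_left (segMax nums i j') (nums.getD (j' + 1) 0)
    have h2 := min_le_left (segMin nums i j') (nums.getD (j' + 1) 0)
    omega

-- widening the window to the left keeps the range over k
lemma Pp_mono_left (nums : List Int) (k : Int) (i i' j : Nat) (hii : i ≤ i') (hij : i' ≤ j)
    (hj : j < nums.length) (h : Pp nums k i' j = true) : Pp nums k i j = true := by
  induction i', hii using Nat.le_induction with
  | base => exact h
  | succ i' hii ih =>
    apply ih (by omega)
    simp only [Pp, decide_eq_true_eq] at h ⊢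
    rw [segMax_cons nums i' j (by omega) hj, segMin_cons nums i' j (by omega) hj]
    have h1 := le_max_right (nums.getD i' 0) (segMax nums (i' + 1) j)
    have h2 := min_le_right (nums.getD i' 0) (segMin nums (i' + 1) j)
    omega

-- the double-sum both programs compute
def pairSum (nums : List Int) (k : Int) : Int :=
  ∑ r ∈ Finset.range nums.length, ∑ i ∈ Finset.range r, (if Pp nums k i r then (1 : Int) else 0)

-- ===== A equals pairSum =====
lemma innerA_eq (nums : List Int) (k : Int) (i : Nat) :
    ∀ (d j : Nat), d = nums.length - (j + 1) → i ≤ j → j < nums.length →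
    innerA nums k (nums.length : Int) (segMax nums i j) (segMin nums i j)
      (PySem.List.pyRange ((j : Int) + 1) (nums.length : Int) 1)
    = ∑ t ∈ Finset.Ico (j + 1) nums.length, (if Pp nums k i t then (1 : Int) else 0) := by
  intro d
  induction d with
  | zero =>
    intro j hd hij hj
    have hj1 : j + 1 = nums.length := by omega
    rw [PySem.List.pyRange_one_eq_nil (by omega)]
    simp only [innerA]
    rw [hj1]
    simp
  | succ d ih =>
    intro j hd hij hj
    have hj1 : j + 1 < nums.length := by omega
    rw [PySem.List.pyRange_one_cons (by omega)]
    simp only [innerA]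
    have hcast : ((j : Int) + 1) = (((j + 1 : Nat)) : Int) := by push_cast; ring
    have hx : (PySem.List.pyGet? nums ((j : Int) + 1)).getD 0 = nums.getD (j + 1) 0 := by
      rw [hcast, PySem.List.pyGet?_natCast, List.getD_eq_getElem?_getD]
    rw [hx]
    have hmin : (if nums.getD (j + 1) 0 < segMin nums i j then nums.getD (j + 1) 0
        else segMin nums i j) = segMin nums i (j + 1) := by
      rw [segMin_snoc nums i j hij hj1, min_def]
      split_ifs <;> omega
    have hmax : (if nums.getD (j + 1) 0 > segMax nums i j then nums.getD (j + 1) 0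
        else segMax nums i j) = segMax nums i (j + 1) := by
      rw [segMax_snoc nums i j hij hj1, max_def]
      split_ifs <;> omega
    rw [hmin, hmax]
    by_cases hP : Pp nums k i (j + 1) = true
    · have hgt : segMax nums i (j + 1) - segMin nums i (j + 1) > k := by
        simpa [Pp, decide_eq_true_eq] using hP
      rw [if_pos hgt]
      have hone : ∀ t ∈ Finset.Ico (j + 1) nums.length,
          (if Pp nums k i t then (1 : Int) else 0) = 1 := by
        intro t ht
        rw [Finset.mem_Ico] at ht
        rw [if_pos (Pp_mono_right nums k i (j + 1) t (by omega) ht.1 ht.2 hP)]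
      rw [Finset.sum_congr rfl hone, Finset.sum_const, Nat.card_Ico,
        nsmul_eq_mul, mul_one]
      omega
    · have hngt : ¬ (segMax nums i (j + 1) - segMin nums i (j + 1) > k) := by
        simpa [Pp, decide_eq_true_eq] using hP
      rw [if_neg hngt]
      have harg : ((j : Int) + 1 + 1) = (((j + 1 : Nat)) : Int) + 1 := by push_cast; ring
      rw [harg, ih (j + 1) (by omega) (by omega) hj1]
      rw [Finset.sum_eq_sum_Ico_succ_bot hj1]
      rw [if_neg (by simpa using hP)]
      ring

lemma foldl_range_sum (n : Nat) (g : Nat → Int) :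
    (List.range n).foldl (fun acc i => acc + g i) 0 = ∑ i ∈ Finset.range n, g i := by
  induction n with
  | zero => rfl
  | succ m ih =>
    rw [List.range_succ, List.foldl_append, ih, Finset.sum_range_succ]
    rfl

lemma sum_triangle_swap (n : Nat) (f : Nat → Nat → Int) :
    ∑ i ∈ Finset.range n, ∑ t ∈ Finset.Ico (i + 1) n, f i t
      = ∑ t ∈ Finset.range n, ∑ i ∈ Finset.range t, f i t := by
  have h1 : ∀ i ∈ Finset.range n,
      ∑ t ∈ Finset.Ico (i + 1) n, f i t
        = ∑ t ∈ Finset.range n, if i < t then f i t else 0 := by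
    intro i hi
    rw [Finset.mem_range] at hi
    rw [Finset.range_eq_Ico,
      ← Finset.sum_Ico_consecutive _ (Nat.zero_le (i + 1)) (by omega : i + 1 ≤ n)]
    have hz : ∑ t ∈ Finset.Ico 0 (i + 1), (if i < t then f i t else 0) = 0 := by
      apply Finset.sum_eq_zero
      intro t ht
      rw [Finset.mem_Ico] at ht
      rw [if_neg (by omega)]
    have ho : ∑ t ∈ Finset.Ico (i + 1) n, (if i < t then f i t else 0)
        = ∑ t ∈ Finset.Ico (i + 1) n, f i t := by
      apply Finset.sum_congr rfl
      intro t ht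
      rw [Finset.mem_Ico] at ht
      rw [if_pos (by omega)]
    rw [hz, ho, zero_add]
  rw [Finset.sum_congr rfl h1, Finset.sum_comm]
  apply Finset.sum_congr rfl
  intro t ht
  rw [Finset.mem_range] at ht
  have hsub : Finset.range t ⊆ Finset.range n := by
    intro x hx
    rw [Finset.mem_range] at *
    omega
  rw [← Finset.sum_subset hsub
    (by intro i _ hi; rw [Finset.mem_range] at hi; rw [if_neg (by omega)])]
  apply Finset.sum_congr rfl
  intro i hi
  rw [Finset.mem_range] at hi
  rw [if_pos hi]

lemma A_eq_pairSum (nums : List Int) (k : Int) : get_num_2 nums k = pairSum nums k := by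
  by_cases hnil : nums = []
  · subst hnil
    simp [get_num_2, pairSum]
  · simp only [get_num_2, if_neg hnil]
    rw [PySem.List.pyRange_zero_natCast, List.foldl_map]
    rw [foldl_range_sum nums.length (fun i => innerA nums k (nums.length : Int)
      ((PySem.List.pyGet? nums (i : Int)).getD 0) ((PySem.List.pyGet? nums (i : Int)).getD 0)
      (PySem.List.pyRange ((i : Int) + 1) (nums.length : Int) 1))]
    have hinner : ∀ i ∈ Finset.range nums.length,
        innerA nums k (nums.length : Int)
          ((PySem.List.pyGet? nums (i : Int)).getD 0) ((PySem.List.pyGet? nums (i : Int)).getD 0)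
          (PySem.List.pyRange ((i : Int) + 1) (nums.length : Int) 1)
        = ∑ t ∈ Finset.Ico (i + 1) nums.length, (if Pp nums k i t then (1 : Int) else 0) := by
      intro i hi
      rw [Finset.mem_range] at hi
      have hx : (PySem.List.pyGet? nums (i : Int)).getD 0 = nums.getD i 0 := by
        rw [PySem.List.pyGet?_natCast, List.getD_eq_getElem?_getD]
      have h := innerA_eq nums k i (nums.length - (i + 1)) i rfl le_rfl hi
      rw [segMax_single nums i hi, segMin_single nums i hi] at h
      rw [hx]
      exact h
    rw [Finset.sum_congr rfl hinner, sum_triangle_swap]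
    rfl

-- ===== B equals pairSum =====
lemma winMax_eq (nums : List Int) (l r : Nat) (hlr : l ≤ r) (hr : r < nums.length) :
    winMax nums (l : Int) (r : Int) = segMax nums l r := by
  unfold winMax
  rw [show ((r : Int) + 1) = (((r + 1 : Nat)) : Int) by push_cast; ring,
    PySem.List.slice_natCast]
  rcases hc : seg nums l r with _ | ⟨a, t⟩
  · exact absurd hc (by unfold seg; simp; omega)
  · have : (nums.drop l).take (r + 1 - l) = a :: t := hc
    rw [this, PySem.List.max?_id_cons]
    simp [segMax, hc]

lemma winMin_eq (nums : List Int) (l r : Nat) (hlr : l ≤ r) (hr : r < nums.length) :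
    winMin nums (l : Int) (r : Int) = segMin nums l r := by
  unfold winMin
  rw [show ((r : Int) + 1) = (((r + 1 : Nat)) : Int) by push_cast; ring,
    PySem.List.slice_natCast]
  rcases hc : seg nums l r with _ | ⟨a, t⟩
  · exact absurd hc (by unfold seg; simp; omega)
  · have : (nums.drop l).take (r + 1 - l) = a :: t := hc
    rw [this, PySem.List.min?_id_cons]
    simp [segMin, hc]

lemma advB_eq (nums : List Int) (k : Int) :
    ∀ (d l r : Nat), d = r - l → l ≤ r → r < nums.length → (∀ i < l, Pp nums k i r = true) →
    ∃ l' : Nat, advB nums k (r : Int) (l : Int) = (l' : Int) ∧ l ≤ l' ∧ l' ≤ r ∧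
      (∀ i < l', Pp nums k i r = true) ∧ (l' = r ∨ Pp nums k l' r = false) := by
  intro d
  induction d with
  | zero =>
    intro l r hd hlr hr hall
    have hlr' : l = r := by omega
    rw [advB]
    rw [dif_neg (by push_cast [hlr']; simp)]
    exact ⟨l, rfl, le_rfl, by omega, hall, Or.inl hlr'⟩
  | succ d ih =>
    intro l r hd hlr hr hall
    have hlt : l < r := by omega
    rw [advB]
    by_cases hP : Pp nums k l r = true
    · rw [dif_pos ⟨by exact_mod_cast hlt, by
        rw [winMax_eq nums l r (by omega) hr, winMin_eq nums l r (by omega) hr]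
        simpa [Pp, decide_eq_true_eq] using hP⟩]
      rw [show ((l : Int) + 1) = (((l + 1 : Nat)) : Int) by push_cast; ring]
      obtain ⟨l', h1, h2, h3, h4, h5⟩ := ih (l + 1) r (by omega) (by omega) hr
        (by intro i hi; rcases Nat.lt_or_ge i l with h | h
            · exact hall i h
            · have : i = l := by omega
              rw [this]; exact hP)
      exact ⟨l', h1, by omega, h3, h4, h5⟩
    · rw [dif_neg (by
        rw [winMax_eq nums l r (by omega) hr, winMin_eq nums l r (by omega) hr]
        intro hc
        exact hP (by simpa [Pp, decide_eq_true_eq] using hc.2))]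
      exact ⟨l, rfl, le_rfl, by omega, hall,
        Or.inr (by simpa using hP)⟩

lemma count_bad (nums : List Int) (k : Int) (l' R : Nat) (hR : R < nums.length) (hl : l' ≤ R)
    (hall : ∀ i < l', Pp nums k i R = true) (hstop : l' = R ∨ Pp nums k l' R = false) :
    ∑ i ∈ Finset.range R, (if Pp nums k i R then (0 : Int) else 1) = (R : Int) - (l' : Int) := by
  rw [Finset.range_eq_Ico, ← Finset.sum_Ico_consecutive _ (Nat.zero_le l') hl]
  have hz : ∑ i ∈ Finset.Ico 0 l', (if Pp nums k i R then (0 : Int) else 1) = 0 := by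
    apply Finset.sum_eq_zero
    intro i hi
    rw [Finset.mem_Ico] at hi
    rw [if_pos (hall i hi.2)]
  have ho : ∑ i ∈ Finset.Ico l' R, (if Pp nums k i R then (0 : Int) else 1)
      = ∑ i ∈ Finset.Ico l' R, (1 : Int) := by
    apply Finset.sum_congr rfl
    intro i hi
    rw [Finset.mem_Ico] at hi
    rcases hstop with h | h
    · omega
    · rw [if_neg (by
        intro hc
        have := Pp_mono_left nums k l' i R hi.1 (by omega) hR hc
        rw [h] at this
        exact Bool.false_ne_true this)]
  rw [hz, ho, Finset.sum_const, Nat.card_Ico, nsmul_eq_mul, mul_one]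
  omega

lemma B_loop (nums : List Int) (k : Int) :
    ∀ R, R ≤ nums.length → ∃ l : Nat,
      (List.range R).foldl
        (fun (st : Int × Int) (r : Nat) =>
          (advB nums k (r : Int) st.1, st.2 + ((r : Int) - advB nums k (r : Int) st.1)))
        (0, 0)
      = ((l : Int), ∑ r ∈ Finset.range R, ∑ i ∈ Finset.range r,
          (if Pp nums k i r then (0 : Int) else 1))
      ∧ l ≤ R ∧ (∀ i < l, Pp nums k i (R - 1) = true) := by
  intro R
  induction R with
  | zero =>
    intro _
    exact ⟨0, by simp, le_rfl, by omega⟩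
  | succ R ih =>
    intro hR
    obtain ⟨l, hfold, hlR, hinv⟩ := ih (by omega)
    have hRn : R < nums.length := by omega
    have hallR : ∀ i < l, Pp nums k i R = true := by
      intro i hi
      exact Pp_mono_right nums k i (R - 1) R (by omega) (by omega) hRn (hinv i hi)
    obtain ⟨l', heq, hll', hl'R, hPall, hstop⟩ :=
      advB_eq nums k (R - l) l R rfl hlR hRn hallR
    refine ⟨l', ?_, by omega, by simpa using hPall⟩
    rw [List.range_succ, List.foldl_append, hfold]
    simp only [List.foldl_cons, List.foldl_nil, heq]
    rw [Finset.sum_range_succ, count_bad nums k l' R hRn hl'R hPall hstop]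

lemma gauss (n : Nat) :
    PySem.Int.floordiv ((n : Int) * ((n : Int) - 1)) 2 = ∑ r ∈ Finset.range n, (r : Int) := by
  have h2 := Finset.sum_range_id_mul_two n
  rw [PySem.Int.floordiv_eq_ediv_of_pos (by norm_num)]
  cases n with
  | zero => simp
  | succ m =>
    have hcast : ((m + 1 : Nat) : Int) * (((m + 1 : Nat) : Int) - 1)
        = (((∑ i ∈ Finset.range (m + 1), i) * 2 : Nat) : Int) := by
      rw [h2]
      push_cast
      ring
    rw [hcast]
    push_cast
    rw [Int.mul_ediv_cancel _ (by norm_num)]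

lemma B_eq_pairSum (nums : List Int) (k : Int) : get_num_2_alt nums k = pairSum nums k := by
  simp only [get_num_2_alt]
  rw [PySem.List.pyRange_zero_natCast, List.foldl_map]
  obtain ⟨l, hfold, _, _⟩ := B_loop nums k nums.length le_rfl
  rw [hfold, gauss]
  unfold pairSum
  rw [← Finset.sum_sub_distrib]
  apply Finset.sum_congr rfl
  intro r hr
  rw [Finset.mem_range] at hr
  have : ∀ i ∈ Finset.range r,
      (if Pp nums k i r then (1 : Int) else 0)
        = 1 - (if Pp nums k i r then (0 : Int) else 1) := by
    intro i _
    by_cases h : Pp nums k i r = true <;> simp [h]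
  rw [Finset.sum_congr rfl this, Finset.sum_sub_distrib, Finset.sum_const]
  simp [Finset.card_range]

-- ===== VERDICT (by name: the statement is the Claim_ definition above) =====
theorem get_num_2_spec : Claim_equal_get_num_2 := by
  intro nums k _
  unfold Spec_get_num_2
  rw [A_eq_pairSum, B_eq_pairSum]
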